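-- pv_equiv track=rewrite | github.com/lykoss/lykos | src/utilities.py | plural
-- ===== SOURCE A (Python) =====
-- def plural(role, count=2):
--     if count == 1:
--         return role
--     bits = role.split()
--     if bits[-1][-2:] == "'s":
--         bits[-1] = plural(bits[-1][:-2], count)
--         bits[-1] += "'" if bits[-1][-1] == "s" else "'s"
--     else:
--         bits[-1] = {"person": "people",
--                     "wolf": "wolves",
--                     "has": "have",
--                     "succubus": "succubi",
--                     "child": "children"}.get(bits[-1], bits[-1] + "s")
--     return " ".join(bits)
-- ===== SOURCE B (Python) =====
-- def plural(role, count=2):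
--     if count == 1:
--         return role
--     bits = role.split()
--     last = bits[-1]
--     depth = 0
--     while last.endswith("'s"):
--         last = last[:-2]
--         depth += 1
--     word = {"person": "people",
--             "wolf": "wolves",
--             "has": "have",
--             "succubus": "succubi",
--             "child": "children"}.get(last, last + "s")
--     for _ in range(depth):
--         word += "'" if word.endswith("s") else "'s"
--     bits[-1] = word
--     return " ".join(bits)
-- ===== Notes on version B (the rewrite author's own statement) =====
-- stated objective: alternative
-- what changed: A handles the possessive "'s" suffixes by recursing through plural() (re-splitting the token each level); B strips all trailing such suffixes in one iterative loop, pluralizes the remaining base word with the same dict, then re-appends the suffixes outward, picking a bare apostrophe when the current word already ends in the letter s and an apostrophe-s suffix otherwise.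
-- outside the precondition, e.g. on plural("'s", 2): A raises IndexError, B returns "s'"
import Mathlib
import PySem

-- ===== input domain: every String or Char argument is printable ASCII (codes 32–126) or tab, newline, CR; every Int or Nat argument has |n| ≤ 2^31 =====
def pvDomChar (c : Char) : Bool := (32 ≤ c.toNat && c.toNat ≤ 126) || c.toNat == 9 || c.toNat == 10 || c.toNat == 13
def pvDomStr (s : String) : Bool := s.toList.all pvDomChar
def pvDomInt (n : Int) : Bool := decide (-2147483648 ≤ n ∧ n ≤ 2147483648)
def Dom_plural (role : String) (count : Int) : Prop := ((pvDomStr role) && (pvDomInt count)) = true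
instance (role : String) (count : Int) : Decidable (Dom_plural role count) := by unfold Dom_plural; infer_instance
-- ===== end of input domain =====

-- B replaces A's recursive possessive handling by an iterative strip-suffixes / pluralize / re-append loop (same return value; no speed claim).

-- ===== PORT A =====
-- the literal dict {"person": "people", …} shared by both sources
def pluralDict : PySem.Dict (List Char) (List Char) :=
  PySem.Dict.ofList [("person".toList, "people".toList),
                     ("wolf".toList, "wolves".toList),
                     ("has".toList, "have".toList),
                     ("succubus".toList, "succubi".toList),
                     ("child".toList, "children".toList)]

-- A's treatment of the last token: bits[-1][-2:] == "'s" test, recursion on bits[-1][:-2], dict lookup otherwise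
def newlastA (fuelRec : List Char → Int → List Char) (t : List Char) (count : Int) : List Char :=
  if PySem.List.slice t (some (-2)) none = ['\'', 's'] then
    let r := fuelRec (PySem.List.slice t none (some (-2))) count
    r ++ (if PySem.List.pyGet? r (-1) = some 's' then ['\''] else ['\'', 's'])
  else
    (pluralDict.get? t).getD (t ++ ['s'])

-- A, step for step, on List Char; fuel only makes the recursion total (never exhausted when the Python returns)
def pluralGoA : Nat → List Char → Int → List Char
  | 0, _, _ => []                                  -- fuel exhausted: unreachable under Pre_
  | fuel + 1, roleCs, count =>
    if count = 1 then roleCs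
    else
      let bits := PySem.Chars.split₀ roleCs
      match PySem.List.pyGet? bits (-1) with
      | none => []                                 -- Python: IndexError on bits[-1] (excluded by Pre_)
      | some last =>
        PySem.Chars.join [' '] (bits.dropLast ++ [newlastA (pluralGoA fuel) last count])

def plural (role : String) (count : Int) : String :=
  String.ofList (pluralGoA (role.toList.length + 1) role.toList count)

-- ===== PORT B =====
-- Source B's `while last.endswith("'s"): last = last[:-2]; depth += 1`, run on the reversed characters
-- (ends-with "'s" ⟺ the reversed list starts with 's', '\''); returns (reversed base, depth)
def stripRevB : List Char → List Char × Nat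
  | 's' :: '\'' :: rest => let p := stripRevB rest; (p.1, p.2 + 1)
  | cs => (cs, 0)

-- Source B's treatment of the last token: strip, pluralize the base, re-append depth suffixes outward
def wordB (t : List Char) : List Char :=
  let p := stripRevB t.reverse
  let base := p.1.reverse
  let word0 := (pluralDict.get? base).getD (base ++ ['s'])
  (List.range p.2).foldl
    (fun w _ => w ++ (if PySem.Chars.endswith w ['s'] then ['\''] else ['\'', 's'])) word0

def pluralAltGo (roleCs : List Char) (count : Int) : List Char :=
  if count = 1 then roleCs
  else
    let bits := PySem.Chars.split₀ roleCs
    match PySem.List.pyGet? bits (-1) with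
    | none => []                                   -- Python: IndexError on bits[-1] (excluded by Pre_)
    | some last =>
      PySem.Chars.join [' '] (bits.dropLast ++ [wordB last])

def plural_alt (role : String) (count : Int) : String :=
  String.ofList (pluralAltGo role.toList count)

-- ===== PRECONDITION & SPEC =====
-- `t` is a pure chain of "'s" suffixes (so A strips it down to the empty string)
def pvApos : List Char → Bool
  | [] => true
  | 's' :: '\'' :: rest => pvApos rest
  | _ => false

-- Pre_ excludes exactly the inputs where A raises IndexError: a role that splits to no words,
-- or whose last word is a pure chain of "'s" suffixes (the recursion bottoms out on the empty string).
def Pre_plural (role : String) (count : Int) : Prop :=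
  count = 1 ∨ (PySem.Chars.split₀ role.toList ≠ [] ∧
               pvApos ((PySem.Chars.split₀ role.toList).getLastD []).reverse = false)
instance (role : String) (count : Int) : Decidable (Pre_plural role count) := by
  unfold Pre_plural; infer_instance

def pvWitness_plural : String × Int := ("wolf's cub's", 2)

def Spec_plural (role : String) (count : Int) (out : String) : Prop := out = plural_alt role count
instance (role : String) (count : Int) (out : String) : Decidable (Spec_plural role count out) := by
  unfold Spec_plural; infer_instance

-- ===== CLAIM (what is proved, stated in full; the proofs are below) =====
def Claim_equal_plural : Prop := ∀ (role : String) (count : Int), Dom_plural role count → Pre_plural role count → Spec_plural role count (plural role count)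

-- ===== LEMMAS AND PROOFS =====

theorem split0_go_inv (N : Nat) :
    ∀ (s cur : List Char) (acc : List (List Char)),
      (∀ c ∈ cur, PySem.Chars.isspace c = false) →
      cur.length + s.length ≤ N →
      (∀ l ∈ acc, l ≠ [] ∧ (∀ c ∈ l, PySem.Chars.isspace c = false) ∧ l.length ≤ N) →
      ∀ l ∈ PySem.Chars.split₀.go s cur acc,
        l ≠ [] ∧ (∀ c ∈ l, PySem.Chars.isspace c = false) ∧ l.length ≤ N := by
  intro s
  induction s with
  | nil =>
    intro cur acc hcur hlen hacc l hl
    by_cases hc : cur.isEmpty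
    · simp only [PySem.Chars.split₀.go, hc, if_true, List.mem_reverse] at hl
      exact hacc l hl
    · simp only [PySem.Chars.split₀.go, hc, Bool.false_eq_true, if_false,
        List.reverse_cons] at hl
      rw [List.mem_append] at hl
      rcases hl with h | h
      · exact hacc l (List.mem_reverse.mp h)
      · have h : l = cur.reverse := by simpa using h
        subst h
        refine ⟨by simpa [List.isEmpty_iff] using hc, ?_, by simpa using hlen⟩
        intro c hc'; exact hcur c (List.mem_reverse.mp hc')
  | cons c rest ih =>
    intro cur acc hcur hlen hacc l hl
    by_cases hs : PySem.Chars.isspace c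
    · by_cases hc : cur.isEmpty
      · simp only [PySem.Chars.split₀.go, hs, hc, if_true] at hl
        exact ih [] acc (by simp) (by simp at hlen ⊢; omega) hacc l hl
      · simp only [PySem.Chars.split₀.go, hs, hc, if_true, if_false] at hl
        refine ih [] (cur.reverse :: acc) (by simp) (by simp at hlen ⊢; omega) ?_ l hl
        intro l' hl'
        rcases List.mem_cons.mp hl' with h | h
        · subst h
          refine ⟨by simpa [List.isEmpty_iff] using hc, ?_, by simp at hlen ⊢; omega⟩
          intro c' hc'; exact hcur c' (List.mem_reverse.mp hc')
        · exact hacc l' h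
    · simp only [PySem.Chars.split₀.go, Bool.not_eq_true] at hl
      rw [if_neg (by simp [hs])] at hl
      refine ih (c :: cur) acc ?_ (by simp at hlen ⊢; omega) hacc l hl
      intro c' hc'
      rcases List.mem_cons.mp hc' with h | h
      · subst h; simpa using hs
      · exact hcur c' h

theorem split0_mem (cs : List Char) :
    ∀ l ∈ PySem.Chars.split₀ cs,
      l ≠ [] ∧ (∀ c ∈ l, PySem.Chars.isspace c = false) ∧ l.length ≤ cs.length := by
  intro l hl
  exact split0_go_inv cs.length cs [] [] (by simp) (by simp) (by simp) l hl

theorem split0_singleton (t : List Char) (hne : t ≠ [])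
    (hns : ∀ c ∈ t, PySem.Chars.isspace c = false) :
    PySem.Chars.split₀ t = [t] := by
  suffices h : ∀ (s cur : List Char) (acc : List (List Char)),
      (∀ c ∈ s, PySem.Chars.isspace c = false) →
      PySem.Chars.split₀.go s cur acc =
        (if (cur.reverse ++ s).isEmpty then acc.reverse else ((cur.reverse ++ s) :: acc).reverse) by
    have := h t [] [] hns
    simp only [PySem.Chars.split₀, this, List.reverse_nil, List.nil_append] at *
    simp [List.isEmpty_iff, hne]
  intro s
  induction s with
  | nil => intro cur acc _; simp [PySem.Chars.split₀.go, List.isEmpty_iff]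
  | cons c rest ih =>
    intro cur acc hns'
    have hc : PySem.Chars.isspace c = false := hns' c (by simp)
    simp only [PySem.Chars.split₀.go, hc, if_neg]
    rw [if_neg (by simp [hc])]
    rw [ih (c :: cur) acc (fun c' h => hns' c' (by simp [h]))]
    simp

-- t ends with "'s"  ⟺  t.reverse starts with 's','\''
theorem slice_end_apos (t : List Char) :
    PySem.List.slice t (some (-2)) none = ['\'', 's'] ↔
      ∃ rest, t.reverse = 's' :: '\'' :: rest := by
  rw [PySem.List.slice_from_neg_ofNat t 2 (by omega)]
  constructor
  · intro h
    refine ⟨(t.take (t.length - 2)).reverse, ?_⟩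
    have hsplit : t = t.take (t.length - 2) ++ t.drop (t.length - 2) :=
      (List.take_append_drop _ _).symm
    rw [hsplit]
    simp [h]
  · rintro ⟨rest, hr⟩
    have ht : t = rest.reverse ++ ['\'', 's'] := by
      have := congrArg List.reverse hr
      simpa using this
    subst ht
    simp

-- t[:-2] is the reverse of t.reverse minus its first two chars
theorem slice_drop2 (t rest : List Char) (h : t.reverse = 's' :: '\'' :: rest) :
    PySem.List.slice t none (some (-2)) = rest.reverse := by
  have ht : t = rest.reverse ++ ['\'', 's'] := by
    have := congrArg List.reverse h; simpa using this
  subst ht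
  rw [PySem.List.slice_to_neg_ofNat _ 2 (by omega)]
  simp

-- the dict's values are all nonempty
theorem get?_ne_nil (base v : List Char) (hv : pluralDict.get? base = some v) : v ≠ [] := by
  have hd : pluralDict = { items := [("person".toList, "people".toList),
                     ("wolf".toList, "wolves".toList),
                     ("has".toList, "have".toList),
                     ("succubus".toList, "succubi".toList),
                     ("child".toList, "children".toList)] } := by decide
  rw [hd] at hv
  simp only [PySem.Dict.get?_mk_cons] at hv
  split_ifs at hv <;>
    first
      | (rw [← Option.some_inj.mp hv]; simp)
      | simp [PySem.Dict.get?] at hv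

-- the dict lookup (or the default base ++ "s") is never empty
theorem word0_ne_nil (base : List Char) :
    (pluralDict.get? base).getD (base ++ ['s']) ≠ [] := by
  rcases hv : pluralDict.get? base with _ | v
  · simp
  · simpa using get?_ne_nil base v hv

-- appending a suffix each iteration keeps the word nonempty
theorem foldl_suffix_ne_nil (d : Nat) :
    ∀ w : List Char, w ≠ [] →
      (List.range d).foldl
        (fun w _ => w ++ (if PySem.Chars.endswith w ['s'] then ['\''] else ['\'', 's'])) w ≠ [] := by
  induction d with
  | zero => intro w hw; simpa using hw
  | succ n ih =>
    intro w hw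
    rw [List.range_succ, List.foldl_append]
    simp only [List.foldl_cons, List.foldl_nil]
    intro h
    rcases List.append_eq_nil_iff.mp h with ⟨h1, _⟩
    exact ih w hw h1

theorem wordB_ne_nil (t : List Char) : wordB t ≠ [] := by
  unfold wordB
  exact foldl_suffix_ne_nil _ _ (word0_ne_nil _)

theorem endswith_s (w : List Char) (hw : w ≠ []) :
    PySem.Chars.endswith w ['s'] = true ↔ PySem.List.pyGet? w (-1) = some 's' := by
  rw [PySem.List.pyGet?_neg_one]
  rw [show PySem.Chars.endswith w ['s'] = List.isSuffixOf ['s'] w from rfl]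
  rw [List.isSuffixOf, List.isPrefixOf_iff_prefix, List.getLast?_eq_head?_reverse]
  rcases hrev : w.reverse with _ | ⟨a, rs⟩
  · exact absurd (by simpa using congrArg List.reverse hrev) hw
  · simp [List.prefix_cons_iff, eq_comm]

-- a reversed token that does not start with 's', '\'' is left alone by the strip loop
theorem stripRevB_eq_self (rs : List Char) (h : ∀ rest, rs ≠ 's' :: '\'' :: rest) :
    stripRevB rs = (rs, 0) := by
  rcases rs with _ | ⟨c1, rs'⟩
  · simp [stripRevB]
  rcases rs' with _ | ⟨c2, rest⟩
  · simp [stripRevB]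
  rw [stripRevB]
  intro r hr
  obtain ⟨h1, h2, h3⟩ : c1 = 's' ∧ c2 = '\'' ∧ rest = r := by simpa using hr
  exact h r (by rw [h1, h2, h3])

-- the heart: A's and B's treatment of one whitespace-free token agree
theorem token_eq (fuel : Nat) :
    ∀ (t : List Char) (count : Int), t.length ≤ fuel → t ≠ [] →
      (∀ c ∈ t, PySem.Chars.isspace c = false) → pvApos t.reverse = false → count ≠ 1 →
      newlastA (pluralGoA fuel) t count = wordB t := by
  induction fuel with
  | zero =>
    intro t count hlen hne _ _ _
    exact absurd (List.eq_nil_of_length_eq_zero (Nat.le_zero.mp hlen)) hne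
  | succ f ih =>
    intro t count hlen hne hns hap hc
    by_cases hend : PySem.List.slice t (some (-2)) none = ['\'', 's']
    · obtain ⟨rest, hrev⟩ := (slice_end_apos t).mp hend
      have hdrop : PySem.List.slice t none (some (-2)) = rest.reverse := slice_drop2 t rest hrev
      have hap' : pvApos rest = false := by
        rw [hrev] at hap; simpa [pvApos] using hap
      have hrne : rest.reverse ≠ [] := by
        intro h
        rw [show rest = [] from by simpa using congrArg List.reverse h] at hap'
        simp [pvApos] at hap'
      have ht : t = rest.reverse ++ ['\'', 's'] := by
        simpa using congrArg List.reverse hrev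
      have hlen' : rest.reverse.length ≤ f := by
        have h2 : t.length = rest.length + 2 := by rw [ht]; simp
        simp only [List.length_reverse]
        omega
      have hns' : ∀ c ∈ rest.reverse, PySem.Chars.isspace c = false := by
        intro c hcm; exact hns c (by rw [ht]; exact List.mem_append_left _ hcm)
      have hrec : pluralGoA (f + 1) rest.reverse count = newlastA (pluralGoA f) rest.reverse count := by
        rw [pluralGoA, if_neg hc, split0_singleton rest.reverse hrne hns']
        show PySem.Chars.join [' '] [newlastA (pluralGoA f) rest.reverse count] = _
        exact PySem.Chars.join_singleton _ _
      have hihv : newlastA (pluralGoA f) rest.reverse count = wordB rest.reverse :=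
        ih rest.reverse count hlen' hrne hns' (by simpa using hap') hc
      -- A side
      simp only [newlastA]
      rw [if_pos hend, hdrop, hrec, hihv]
      -- B side
      have hstrip : stripRevB t.reverse = ((stripRevB rest).1, (stripRevB rest).2 + 1) := by
        rw [hrev, stripRevB]
      have hWB : wordB t =
          wordB rest.reverse ++
            (if PySem.Chars.endswith (wordB rest.reverse) ['s'] then ['\''] else ['\'', 's']) := by
        simp only [wordB, hstrip]
        simp only [List.reverse_reverse]
        rw [List.range_succ, List.foldl_append]
        simp
      rw [hWB]
      congr 1
      by_cases hs : PySem.List.pyGet? (wordB rest.reverse) (-1) = some 's'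
      · rw [if_pos hs, if_pos ((endswith_s _ (wordB_ne_nil _)).mpr hs)]
      · rw [if_neg hs,
          if_neg (fun h => hs ((endswith_s _ (wordB_ne_nil _)).mp h))]
    · -- no "'s" suffix: both sides are the dict lookup on t itself
      have hnostrip : stripRevB t.reverse = (t.reverse, 0) := by
        refine stripRevB_eq_self t.reverse (fun rest h => ?_)
        exact hend ((slice_end_apos t).mpr ⟨rest, h⟩)
      simp only [newlastA, if_neg hend, wordB, hnostrip]
      simp

-- ===== VERDICT (by name: the statement is the Claim_ definition above) =====
theorem plural_spec : Claim_equal_plural := by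
  intro role count _ hpre
  unfold Spec_plural plural plural_alt pluralAltGo
  simp only [pluralGoA]
  by_cases hc : count = 1
  · rw [if_pos hc, if_pos hc]
  · rw [if_neg hc, if_neg hc]
    rcases hpre with h1 | ⟨hb, hap⟩
    · exact absurd h1 hc
    obtain ⟨last, hl⟩ : ∃ l, (PySem.Chars.split₀ role.toList).getLast? = some l := by
      cases hbl : (PySem.Chars.split₀ role.toList).getLast? with
      | none => exact absurd (List.getLast?_eq_none_iff.mp hbl) hb
      | some l => exact ⟨l, rfl⟩
    have hmem : last ∈ PySem.Chars.split₀ role.toList := List.mem_of_getLast? hl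
    have hgd : (PySem.Chars.split₀ role.toList).getLastD [] = last := by
      rw [List.getLastD_eq_getLast?, hl]; rfl
    obtain ⟨hne, hns, hlen⟩ := split0_mem role.toList last hmem
    have htok := token_eq role.toList.length last count hlen hne hns (hgd ▸ hap) hc
    simp only [PySem.List.pyGet?_neg_one, hl, htok]
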